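-- pv_equiv track=rewrite | github.com/nasuf/Companion_server | app/services/topic.py | detect_topic_fatigue
-- ===== SOURCE A (Python) =====
-- def detect_topic_fatigue(topic_info: dict, recent_messages: list[str] | None = None) -> bool:
--     """检测话题疲劳。
--
--     2I.5: 两个条件取OR:
--     - 连续5轮消息长度<10字
--     - 连续3轮消息长度<2字
--     """
--     recent_messages = recent_messages or []
--
--     # 条件1: 连续5轮<10字
--     if len(recent_messages) >= 5:
--         last5 = recent_messages[-5:]
--         if all(len(m) < 10 for m in last5):
--             return True
--
--     # 条件2: 连续3轮<2字
--     if len(recent_messages) >= 3: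
--         last3 = recent_messages[-3:]
--         if all(len(m) < 2 for m in last3):
--             return True
--
--     return False
-- ===== SOURCE B (Python) =====
-- def detect_topic_fatigue(topic_info: dict, recent_messages: list[str] | None = None) -> bool:
--     """Single backward walk: count the contiguous trailing runs of short
--     messages and compare the run lengths against the thresholds."""
--     msgs = recent_messages or []
--     run10 = 0
--     for m in reversed(msgs):
--         if len(m) < 10:
--             run10 += 1
--         else:
--             break
--     run2 = 0
--     for m in reversed(msgs):
--         if len(m) < 2:
--             run2 += 1
--         else:
--             break
--     return run10 >= 5 or run2 >= 3
-- ===== Notes on version B (the rewrite author's own statement) =====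
-- stated objective: alternative
-- what changed: Replaces the slice-then-all() checks guarded by length tests with a backward walk that counts the contiguous trailing runs of messages shorter than 10 and shorter than 2 characters, then compares the run lengths to the thresholds.
import Mathlib
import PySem

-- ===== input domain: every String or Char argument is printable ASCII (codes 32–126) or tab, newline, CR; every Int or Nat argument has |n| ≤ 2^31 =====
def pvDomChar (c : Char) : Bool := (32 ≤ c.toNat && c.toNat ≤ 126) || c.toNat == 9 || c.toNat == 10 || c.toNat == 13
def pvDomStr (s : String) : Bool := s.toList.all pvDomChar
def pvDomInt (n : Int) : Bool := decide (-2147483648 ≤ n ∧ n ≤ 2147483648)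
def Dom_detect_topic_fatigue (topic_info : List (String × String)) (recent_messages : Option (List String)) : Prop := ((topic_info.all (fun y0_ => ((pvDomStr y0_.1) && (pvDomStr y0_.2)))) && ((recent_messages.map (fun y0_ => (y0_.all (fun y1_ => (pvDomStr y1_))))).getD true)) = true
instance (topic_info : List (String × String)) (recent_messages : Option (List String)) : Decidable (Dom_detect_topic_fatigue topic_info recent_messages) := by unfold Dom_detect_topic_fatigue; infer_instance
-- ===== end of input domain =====

-- B replaces A's two guarded slice+all() checks by a backward walk counting the trailing runs
-- of short messages (alternative decomposition; same asymptotic cost).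

-- ===== PORT A =====
-- slice-then-all, guarded by length checks, exactly as A
def detect_topic_fatigue (topic_info : List (String × String)) (recent_messages : Option (List String)) : Bool :=
  let msgs := match recent_messages with
    | none => []            -- recent_messages or []
    | some l => l           -- (a falsy [] stays [])
  if 5 ≤ msgs.length ∧
      (PySem.List.slice msgs (some (-5)) none).all (fun m => decide (PySem.Str.len m < 10)) then
    true
  else if 3 ≤ msgs.length ∧
      (PySem.List.slice msgs (some (-3)) none).all (fun m => decide (PySem.Str.len m < 2)) then
    true
  else
    false

-- ===== PORT B =====
-- length of the contiguous run of messages with len < bound at the front of r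
-- (applied to msgs.reverse, this is the trailing run of msgs; = Source B's for/break loop)
def pvRunLt (bound : Int) : List String → Nat
  | [] => 0
  | m :: rest => if PySem.Str.len m < bound then pvRunLt bound rest + 1 else 0

def detect_topic_fatigue_alt (topic_info : List (String × String)) (recent_messages : Option (List String)) : Bool :=
  let msgs := match recent_messages with
    | none => []
    | some l => l
  let run10 := pvRunLt 10 msgs.reverse
  let run2 := pvRunLt 2 msgs.reverse
  decide (5 ≤ run10) || decide (3 ≤ run2)

-- ===== PRECONDITION & SPEC =====
def Spec_detect_topic_fatigue (topic_info : List (String × String)) (recent_messages : Option (List String)) (out : Bool) : Prop := out = detect_topic_fatigue_alt topic_info recent_messages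
instance (topic_info : List (String × String)) (recent_messages : Option (List String)) (out : Bool) : Decidable (Spec_detect_topic_fatigue topic_info recent_messages out) := by unfold Spec_detect_topic_fatigue; infer_instance

-- ===== CLAIM (what is proved, stated in full; the proofs are below) =====
def Claim_equal_detect_topic_fatigue : Prop := ∀ (topic_info : List (String × String)) (recent_messages : Option (List String)), Dom_detect_topic_fatigue topic_info recent_messages → Spec_detect_topic_fatigue topic_info recent_messages (detect_topic_fatigue topic_info recent_messages)

-- ===== LEMMAS AND PROOFS =====

-- the run length dominates k iff the first k elements exist and are all short
theorem pvRunLt_ge_iff (bound : Int) (r : List String) (k : Nat) :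
    k ≤ pvRunLt bound r ↔ k ≤ r.length ∧ ∀ m ∈ r.take k, PySem.Str.len m < bound := by
  induction r generalizing k with
  | nil => cases k <;> simp [pvRunLt]
  | cons m rest ih =>
    cases k with
    | zero => simp
    | succ k =>
      simp only [pvRunLt, List.take_succ_cons, List.length_cons, List.mem_cons]
      split_ifs with hm
      · rw [Nat.succ_le_succ_iff, Nat.succ_le_succ_iff, ih]
        constructor
        · rintro ⟨h1, h2⟩
          exact ⟨h1, fun x hx => hx.elim (fun e => e ▸ hm) (h2 x)⟩
        · rintro ⟨h1, h2⟩
          exact ⟨h1, fun x hx => h2 x (Or.inr hx)⟩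
      · constructor
        · omega
        · rintro ⟨-, h2⟩
          exact absurd (h2 m (Or.inl rfl)) hm

-- one trailing-run condition matches one of A's guarded slice checks
theorem run_cond_iff (bound : Int) (msgs : List String) (k : Nat) (hk : 1 < k) :
    k ≤ pvRunLt bound msgs.reverse ↔
      (k ≤ msgs.length ∧
        (PySem.List.slice msgs (some (-(k : Int))) none).all
          (fun m => decide (PySem.Str.len m < bound)) = true) := by
  rw [pvRunLt_ge_iff, List.length_reverse]
  constructor
  · rintro ⟨h1, h2⟩
    refine ⟨h1, ?_⟩
    rw [PySem.List.slice_from_neg_natCast msgs k (by omega), List.all_eq_true]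
    simp only [decide_eq_true_eq]
    intro m hm
    refine h2 m ?_
    rw [List.take_reverse, List.mem_reverse]
    exact hm
  · rintro ⟨h1, h2⟩
    refine ⟨h1, ?_⟩
    rw [PySem.List.slice_from_neg_natCast msgs k (by omega), List.all_eq_true] at h2
    simp only [decide_eq_true_eq] at h2
    intro m hm
    rw [List.take_reverse, List.mem_reverse] at hm
    exact h2 m hm

theorem core_eq (msgs : List String) :
    (if 5 ≤ msgs.length ∧
        (PySem.List.slice msgs (some (-5)) none).all (fun m => decide (PySem.Str.len m < 10)) then
      true
    else if 3 ≤ msgs.length ∧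
        (PySem.List.slice msgs (some (-3)) none).all (fun m => decide (PySem.Str.len m < 2)) then
      true
    else
      false)
    = (decide (5 ≤ pvRunLt 10 msgs.reverse) || decide (3 ≤ pvRunLt 2 msgs.reverse)) := by
  have h10 := run_cond_iff 10 msgs 5 (by omega)
  have h2 := run_cond_iff 2 msgs 3 (by omega)
  simp only [Nat.cast_ofNat] at h10 h2
  split_ifs with c1 c2
  · simp [h10.mpr c1]
  · simp [h2.mpr c2]
  · symm
    simp only [Bool.or_eq_false_iff, decide_eq_false_iff_not]
    exact ⟨fun h => c1 (h10.mp h), fun h => c2 (h2.mp h)⟩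

-- ===== VERDICT (by name: the statement is the Claim_ definition above) =====
theorem detect_topic_fatigue_spec : Claim_equal_detect_topic_fatigue := by
  intro topic_info recent_messages _
  unfold Spec_detect_topic_fatigue detect_topic_fatigue detect_topic_fatigue_alt
  cases recent_messages with
  | none => exact core_eq []
  | some l => exact core_eq l
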